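-- pv_equiv track=rewrite | github.com/egerberkuslu/uniAI | src/mcp/server.py | _split_filter_key
-- ===== SOURCE A (Python) =====
-- def _split_filter_key(key: str) -> tuple[str, str]:
--     for suffix, operator in (
--         ("_gte", "gte"),
--         ("_lte", "lte"),
--         ("_gt", "gt"),
--         ("_lt", "lt"),
--     ):
--         if key.endswith(suffix):
--             return key[: -len(suffix)], operator
--     return key, "eq"
-- ===== SOURCE B (Python) =====
-- def _split_filter_key(key: str) -> tuple[str, str]:
--     field, sep, op = key.rpartition("_")
--     if sep and op in {"gt", "gte", "lt", "lte"}: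
--         return field, op
--     return key, "eq"
-- ===== Notes on version B (the rewrite author's own statement) =====
-- stated objective: simpler
-- what changed: Replaces the ordered four-candidate endswith suffix scan by one rpartition at the last underscore followed by a membership test of the trailing segment against {'gt','gte','lt','lte'}.
import Mathlib
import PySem

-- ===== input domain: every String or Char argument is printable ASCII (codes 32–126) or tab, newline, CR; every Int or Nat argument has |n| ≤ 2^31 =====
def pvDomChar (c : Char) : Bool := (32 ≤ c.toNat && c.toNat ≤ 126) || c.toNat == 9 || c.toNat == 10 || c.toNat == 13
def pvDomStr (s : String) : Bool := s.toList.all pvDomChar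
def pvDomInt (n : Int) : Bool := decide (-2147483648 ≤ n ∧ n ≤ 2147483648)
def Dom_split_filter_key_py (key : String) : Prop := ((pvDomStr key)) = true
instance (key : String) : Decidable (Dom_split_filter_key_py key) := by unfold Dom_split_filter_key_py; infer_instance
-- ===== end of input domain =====

-- B replaces A's ordered endswith scan over four suffixes by a single rpartition at the
-- last underscore plus a table lookup of the trailing segment (objective: simpler).

-- ===== PORT A =====
-- A's loop over the constant 4-tuple of (suffix, operator) pairs, unrolled in order.
def split_filter_key_py (key : String) : String × String :=
  if PySem.Str.endswith key "_gte" then (PySem.Str.slice key none (some (-4)), "gte")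
  else if PySem.Str.endswith key "_lte" then (PySem.Str.slice key none (some (-4)), "lte")
  else if PySem.Str.endswith key "_gt" then (PySem.Str.slice key none (some (-3)), "gt")
  else if PySem.Str.endswith key "_lt" then (PySem.Str.slice key none (some (-3)), "lt")
  else (key, "eq")

-- ===== PORT B =====
-- key.rpartition("_") ported by hand (PySem has no rpartition): scan the reversed code
-- points up to the first '_'; exact for a one-character separator.
def split_filter_key_py_alt (key : String) : String × String :=
  let r := key.toList.reverse
  let opR := r.takeWhile (fun c => c != '_')
  let sepRest := r.dropWhile (fun c => c != '_')
  let op := opR.reverse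
  if sepRest ≠ [] ∧ (op = "gt".toList ∨ op = "gte".toList ∨ op = "lt".toList ∨ op = "lte".toList)
  then (String.ofList sepRest.tail.reverse, String.ofList op)
  else (key, "eq")

-- ===== PRECONDITION & SPEC =====
def Spec_split_filter_key_py (key : String) (out : String × String) : Prop := out = split_filter_key_py_alt key
instance (key : String) (out : String × String) : Decidable (Spec_split_filter_key_py key out) := by unfold Spec_split_filter_key_py; infer_instance

-- ===== CLAIM (what is proved, stated in full; the proofs are below) =====
def Claim_equal_split_filter_key_py : Prop := ∀ (key : String), Dom_split_filter_key_py key → Spec_split_filter_key_py key (split_filter_key_py key)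

-- ===== LEMMAS AND PROOFS =====

-- takeWhile/dropWhile of a list of the shape L ++ '_' :: rest, where L avoids '_'
theorem pv_tw_shape (L rest : List Char) (hL : ∀ c ∈ L, (c != '_') = true) :
    (L ++ '_' :: rest).takeWhile (fun c => c != '_') = L ∧
    (L ++ '_' :: rest).dropWhile (fun c => c != '_') = '_' :: rest := by
  induction L with
  | nil => simp
  | cons a L ih =>
    have ha : (a != '_') = true := hL a (by simp)
    have := ih (fun c hc => hL c (by simp [hc]))
    simp [ha, this.1, this.2]

-- if dropWhile is nonempty, the list decomposes at the first '_'
theorem pv_shape_of (r : List Char) (h : r.dropWhile (fun c => c != '_') ≠ []) :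
    r = r.takeWhile (fun c => c != '_') ++ '_' :: (r.dropWhile (fun c => c != '_')).tail := by
  induction r with
  | nil => simp at h
  | cons a r ih =>
    by_cases ha : a = '_'
    · subst ha; simp
    · have ha' : (a != '_') = true := by simp [ha]
      simp only [List.takeWhile_cons, List.dropWhile_cons, ha', if_pos] at *
      have := ih h
      simpa using congrArg (a :: ·) this

-- endswith on strings, as a suffix relation on code points
theorem pv_endswith_iff (key p : String) :
    PySem.Str.endswith key p = true ↔ p.toList <:+ key.toList := by
  simp [PySem.Chars.endswith_iff]

-- if B's branch condition holds with trailing segment op, the key ends with '_' :: op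
theorem pv_neg (key : String) (op : List Char)
    (hne : key.toList.reverse.dropWhile (fun c => c != '_') ≠ [])
    (hop : (key.toList.reverse.takeWhile (fun c => c != '_')).reverse = op) :
    '_' :: op <:+ key.toList := by
  have hdec := pv_shape_of key.toList.reverse hne
  have h : key.toList
      = ((key.toList.reverse.dropWhile (fun c => c != '_')).tail).reverse ++ '_' :: op := by
    conv_lhs => rw [← List.reverse_reverse key.toList, hdec]
    simp [hop]
  exact ⟨_, h.symm⟩

-- the positive case: if key ends with '_' :: op (op '_'-free), B's reversed key decomposes
theorem pv_pos (key : String) (op t : List Char)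
    (hop : ∀ c ∈ op.reverse, (c != '_') = true)
    (ht : t ++ '_' :: op = key.toList) :
    key.toList.reverse.takeWhile (fun c => c != '_') = op.reverse ∧
    key.toList.reverse.dropWhile (fun c => c != '_') = '_' :: t.reverse := by
  have hr : key.toList.reverse = op.reverse ++ '_' :: t.reverse := by
    rw [← ht]; simp
  have h := pv_tw_shape op.reverse t.reverse hop
  rw [hr]
  exact ⟨h.1, h.2⟩

-- the sliced field equals the part before the matched suffix
theorem pv_slice (key : String) (op t : List Char) (k : Nat) (hk : 1 < k)
    (hlen : op.length + 1 = k)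
    (ht : t ++ '_' :: op = key.toList) :
    PySem.Str.slice key none (some (-(k : Int))) = String.ofList t := by
  have h1 : (PySem.Str.slice key none (some (-(k : Int)))).toList
      = key.toList.take (key.toList.length - k) := by
    simp only [PySem.Str.slice, PySem.Chars.slice_eq_listSlice, String.toList_ofList]
    rw [PySem.List.slice_to_neg_natCast key.toList k (by omega)]
  have h2 : key.toList.take (key.toList.length - k) = t := by
    rw [← ht]; simp [← hlen]
  have h3 := congrArg String.ofList (h1.trans h2)
  rwa [String.ofList_toList] at h3

-- one positive branch: if key = t ++ '_' :: op with op a known '_'-free operator,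
-- B returns (t, op) as well
theorem pv_case (key : String) (op : List Char) (k : Nat) (hk : 1 < k)
    (hlen : op.length + 1 = k)
    (hop_ne : ∀ c ∈ op.reverse, (c != '_') = true)
    (t : List Char) (ht : t ++ '_' :: op = key.toList)
    (hmem : op = "gt".toList ∨ op = "gte".toList ∨ op = "lt".toList ∨ op = "lte".toList) :
    (PySem.Str.slice key none (some (-(k : Int))), String.ofList op)
      = split_filter_key_py_alt key := by
  unfold split_filter_key_py_alt
  obtain ⟨htw, hdw⟩ := pv_pos key op t hop_ne ht
  have hsl := pv_slice key op t k hk hlen ht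
  simp only [htw, hdw]
  split_ifs with hc
  · exact congrArg₂ Prod.mk (by rw [hsl]; simp) (by simp)
  · exact absurd ⟨by simp, by simpa using hmem⟩ hc

set_option maxRecDepth 8000 in
theorem split_filter_key_py_spec : Claim_equal_split_filter_key_py := by
  intro key _
  unfold Spec_split_filter_key_py split_filter_key_py
  by_cases h1 : PySem.Str.endswith key "_gte" = true
  · obtain ⟨t, ht0⟩ := (pv_endswith_iff key "_gte").mp h1
    have ht : t ++ '_' :: ['g','t','e'] = key.toList := by
      rw [show "_gte".toList = '_' :: ['g','t','e'] from by decide] at ht0; exact ht0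
    have h := pv_case key ['g','t','e'] 4 (by omega) rfl (by simp) t ht
      (Or.inr (Or.inl (by decide)))
    push_cast at h
    rw [if_pos h1]
    exact h
  · by_cases h2 : PySem.Str.endswith key "_lte" = true
    · obtain ⟨t, ht0⟩ := (pv_endswith_iff key "_lte").mp h2
      have ht : t ++ '_' :: ['l','t','e'] = key.toList := by
        rw [show "_lte".toList = '_' :: ['l','t','e'] from by decide] at ht0; exact ht0
      have h := pv_case key ['l','t','e'] 4 (by omega) rfl (by simp) t ht
        (Or.inr (Or.inr (Or.inr (by decide))))
      push_cast at h
      rw [if_neg h1, if_pos h2]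
      exact h
    · by_cases h3 : PySem.Str.endswith key "_gt" = true
      · obtain ⟨t, ht0⟩ := (pv_endswith_iff key "_gt").mp h3
        have ht : t ++ '_' :: ['g','t'] = key.toList := by
          rw [show "_gt".toList = '_' :: ['g','t'] from by decide] at ht0; exact ht0
        have h := pv_case key ['g','t'] 3 (by omega) rfl (by simp) t ht
          (Or.inl (by decide))
        push_cast at h
        rw [if_neg h1, if_neg h2, if_pos h3]
        exact h
      · by_cases h4 : PySem.Str.endswith key "_lt" = true
        · obtain ⟨t, ht0⟩ := (pv_endswith_iff key "_lt").mp h4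
          have ht : t ++ '_' :: ['l','t'] = key.toList := by
            rw [show "_lt".toList = '_' :: ['l','t'] from by decide] at ht0; exact ht0
          have h := pv_case key ['l','t'] 3 (by omega) rfl (by simp) t ht
            (Or.inr (Or.inr (Or.inl (by decide))))
          push_cast at h
          rw [if_neg h1, if_neg h2, if_neg h3, if_pos h4]
          exact h
        · rw [if_neg h1, if_neg h2, if_neg h3, if_neg h4]
          unfold split_filter_key_py_alt
          rw [if_neg]
          rintro ⟨hne, hop⟩
          rcases hop with hop | hop | hop | hop
          · exact h3 ((pv_endswith_iff key "_gt").mpr (pv_neg key "gt".toList hne hop))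
          · exact h1 ((pv_endswith_iff key "_gte").mpr (pv_neg key "gte".toList hne hop))
          · exact h4 ((pv_endswith_iff key "_lt").mpr (pv_neg key "lt".toList hne hop))
          · exact h2 ((pv_endswith_iff key "_lte").mpr (pv_neg key "lte".toList hne hop))
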